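-- pv_equiv track=rewrite | github.com/Jinho199627/27 | 0529.py | group_word
-- ===== SOURCE A (Python) =====
-- def group_word(input_value):
--     for i in str(input_value):
--         while i*2 in input_value:
--             input_value = input_value.replace(i*2,i)
--     #(배운 것) 특정 문자가 여러 번 나오면 i*2로 체크해주고 i*2를 i로 바꿔서 여러 번 나온 걸 한 번으로 고칠 수 있다.
--     if len(input_value) == len(set(input_value)):
--         b = 1
--     else:
--         b = 0
--     return b
-- ===== SOURCE B (Python) =====
-- def group_word(input_value):
--     collapsed = []
--     prev = None
--     for ch in input_value:
--         if ch != prev: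
--             collapsed.append(ch)
--             prev = ch
--     return 1 if len(collapsed) == len(set(collapsed)) else 0
-- ===== Notes on version B (the rewrite author's own statement) =====
-- stated objective: faster
-- what changed: Replaces the per-character while-loop of global string.replace passes (rescanning the whole string each time) with a single left-to-right pass that drops a character equal to its predecessor, then one set-based uniqueness check.
import Mathlib
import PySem

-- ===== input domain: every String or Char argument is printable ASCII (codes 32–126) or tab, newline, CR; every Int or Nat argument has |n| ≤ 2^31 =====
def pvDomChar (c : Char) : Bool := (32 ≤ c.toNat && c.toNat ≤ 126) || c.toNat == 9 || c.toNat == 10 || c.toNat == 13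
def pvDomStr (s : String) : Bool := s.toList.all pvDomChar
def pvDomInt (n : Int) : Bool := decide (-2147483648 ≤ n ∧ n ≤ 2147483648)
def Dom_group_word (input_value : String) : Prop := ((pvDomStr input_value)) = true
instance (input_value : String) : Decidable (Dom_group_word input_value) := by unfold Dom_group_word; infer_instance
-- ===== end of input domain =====

-- B replaces A's per-character while-loops of global `replace` passes by one linear
-- left-to-right pass collapsing adjacent duplicates, then the same set-size uniqueness check.

-- ===== PORT A =====
-- `repCC c` is a proof-level model of one global pass of s.replace(c+c, c); it and the
-- length lemmas below must precede the port because pyWhile's termination proof cites them.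
def repCC (c : Char) : List Char → List Char
  | [] => []
  | [a] => [a]
  | a :: b :: t => if a = c ∧ b = c then c :: repCC c t else a :: repCC c (b :: t)

theorem replaceGo_eq_repCC (c : Char) :
    ∀ (fuel : Nat) (l acc : List Char), l.length ≤ fuel →
      PySem.Chars.replace.go [c, c] [c] fuel l acc = acc.reverse ++ repCC c l := by
  intro fuel
  induction fuel with
  | zero =>
    intro l acc h
    have hl : l = [] := List.eq_nil_of_length_eq_zero (Nat.le_zero.mp h)
    subst hl; simp [PySem.Chars.replace.go, repCC]
  | succ n ih =>
    intro l acc h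
    match l with
    | [] => simp [PySem.Chars.replace.go, repCC]
    | ch :: t =>
      rw [PySem.Chars.replace.go]
      by_cases hp : [c, c].isPrefixOf (ch :: t) = true
      · match t, hp with
        | [], hp => simp [List.isPrefixOf] at hp
        | c' :: t', hp =>
          have h1 : ch = c ∧ c' = c := by
            have := (List.isPrefixOf_iff_prefix).mp hp
            rcases List.cons_prefix_cons.mp this with ⟨ha, h2⟩
            rcases List.cons_prefix_cons.mp h2 with ⟨hb, _⟩
            exact ⟨ha.symm, hb.symm⟩
          simp only [hp, if_true, List.length_cons, List.length_nil, List.drop_succ_cons, List.drop_zero]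
          rw [ih t' (([c].reverse) ++ acc) (by simp at h ⊢; omega)]
          simp [repCC, h1.1, h1.2]
      · simp only [hp]
        rw [ih t (ch :: acc) (by simp at h ⊢; omega)]
        match t with
        | [] => simp [repCC]
        | b :: u =>
          have hno : ¬ (ch = c ∧ b = c) := by
            intro ⟨hc1, hc2⟩
            exact hp (by simp [hc1, hc2])
          simp [repCC, hno]

theorem replace_eq_repCC (c : Char) (l : List Char) :
    PySem.Chars.replace l [c, c] [c] = repCC c l := by
  rw [PySem.Chars.replace]
  simp only [List.isEmpty, reduceCtorEq, if_false]
  simpa using replaceGo_eq_repCC c l.length l [] (le_refl _)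

theorem repCC_length_le (c : Char) : ∀ l : List Char, (repCC c l).length ≤ l.length := by
  intro l
  induction l using repCC.induct c with
  | case1 => simp [repCC]
  | case2 => simp [repCC]
  | case3 a b t h ih => simp only [repCC, if_pos h]; simp at ih ⊢; omega
  | case4 a b t h ih => simp only [repCC, if_neg h]; simp at ih ⊢; omega

theorem repCC_length_lt (c : Char) :
    ∀ l : List Char, [c, c] <:+: l → (repCC c l).length < l.length := by
  intro l
  induction l using repCC.induct c with
  | case1 => intro h; exact absurd (List.IsInfix.length_le h) (by simp)
  | case2 a => intro h; exact absurd (List.IsInfix.length_le h) (by simp)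
  | case3 a b t h ih =>
    intro _
    have := repCC_length_le c t
    simp only [repCC, if_pos h]
    simp at this ⊢; omega
  | case4 a b t h ih =>
    intro hin
    have hbt : [c, c] <:+: (b :: t) := by
      rcases (List.infix_cons_iff).mp hin with hpre | htail
      · rcases (List.cons_prefix_cons).mp hpre with ⟨ha, hpre2⟩
        rcases (List.cons_prefix_cons).mp hpre2 with ⟨hb, _⟩
        exact absurd ⟨ha.symm, hb.symm⟩ h
      · exact htail
    have := ih hbt
    simp only [repCC, if_neg h]
    simp at this ⊢; omega

def pyWhile (c : Char) (t : List Char) : List Char :=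
  if PySem.Chars.isIn [c, c] t then pyWhile c (PySem.Chars.replace t [c, c] [c]) else t
termination_by t.length
decreasing_by
  rename_i h
  rw [replace_eq_repCC]
  exact repCC_length_lt c t ((PySem.Chars.isIn_iff_infix _ _).mp h)

def group_word (input_value : String) : Int :=
  -- for i in str(input_value): the while loop above, rebinding input_value
  let final := input_value.toList.foldl (fun t i => pyWhile i t) input_value.toList
  -- if len(input_value) == len(set(input_value)): b = 1 else: b = 0
  if final.length = (PySem.Set.ofList final).length then 1 else 0

-- ===== PORT B =====
def group_word_alt (input_value : String) : Int :=
  let step : List Char × Option Char → Char → List Char × Option Char :=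
    fun st ch => if some ch ≠ st.2 then (st.1 ++ [ch], some ch) else st
  let collapsed := (input_value.toList.foldl step ([], none)).1
  if collapsed.length = (PySem.Set.ofList collapsed).length then 1 else 0

-- ===== PRECONDITION & SPEC =====
def Spec_group_word (input_value : String) (out : Int) : Prop := out = group_word_alt input_value
instance (input_value : String) (out : Int) : Decidable (Spec_group_word input_value out) := by unfold Spec_group_word; infer_instance

-- ===== CLAIM (what is proved, stated in full; the proofs are below) =====
def Claim_equal_group_word : Prop := ∀ (input_value : String), Dom_group_word input_value → Spec_group_word input_value (group_word input_value)

-- ===== LEMMAS AND PROOFS =====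
-- `dd` is the adjacent-duplicate collapse (one representative per run);
-- `hasAA a t` says t contains two adjacent occurrences of a.
def dd : List Char → List Char
  | [] => []
  | [a] => [a]
  | a :: b :: t => if a = b then dd (b :: t) else a :: dd (b :: t)

def hasAA (a : Char) : List Char → Prop
  | [] => False
  | [_] => False
  | x :: y :: u => (x = a ∧ y = a) ∨ hasAA a (y :: u)

theorem hasAA_iff_infix (a : Char) : ∀ l : List Char, hasAA a l ↔ [a, a] <:+: l := by
  intro l
  induction l with
  | nil => simp [hasAA]
  | cons x t ih =>
    match t with
    | [] =>
      simp only [hasAA, false_iff]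
      intro h; exact absurd (List.IsInfix.length_le h) (by simp)
    | y :: u =>
      constructor
      · intro h
        rcases h with ⟨h1, h2⟩ | h2
        · exact ⟨[], u, by simp [h1, h2]⟩
        · exact List.infix_cons_iff.mpr (Or.inr (ih.mp h2))
      · intro h
        rcases List.infix_cons_iff.mp h with hpre | htail
        · rcases List.cons_prefix_cons.mp hpre with ⟨h1, hpre2⟩
          rcases List.cons_prefix_cons.mp hpre2 with ⟨h2, _⟩
          exact Or.inl ⟨h1.symm, h2.symm⟩
        · exact Or.inr (ih.mpr htail)

theorem hasAA_mem (a : Char) : ∀ l : List Char, hasAA a l → a ∈ l := by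
  intro l
  induction l with
  | nil => intro h; exact absurd h id
  | cons x t ih =>
    match t with
    | [] => intro h; exact absurd h id
    | y :: u =>
      intro h
      rcases h with ⟨h1, _⟩ | h2
      · exact h1 ▸ List.mem_cons_self
      · exact List.mem_cons_of_mem x (ih h2)

theorem dd_cons_repCC (c : Char) :
    ∀ t : List Char, ∀ x : Char, dd (x :: repCC c t) = dd (x :: t) := by
  intro t
  induction t using repCC.induct c with
  | case1 => intro x; simp [repCC]
  | case2 a => intro x; simp [repCC]
  | case3 a b t h ih =>
    intro x
    simp only [repCC, if_pos h]
    rw [show (a :: b :: t) = (c :: c :: t) by simp [h.1, h.2]]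
    by_cases hx : x = c
    · simp only [dd, if_pos hx]
      rw [ih c]
      simp
    · simp only [dd, if_neg hx]
      rw [ih c]
      simp
  | case4 a b t h ih =>
    intro x
    simp only [repCC, if_neg h]
    by_cases hx : x = a
    · simp only [dd, if_pos hx]; exact ih a
    · simp only [dd, if_neg hx]; rw [ih a]
      simp only [dd]

theorem dd_repCC (c : Char) : ∀ t : List Char, dd (repCC c t) = dd t := by
  intro t
  induction t using repCC.induct c with
  | case1 => simp [repCC]
  | case2 a => simp [repCC]
  | case3 a b t h ih =>
    simp only [repCC, if_pos h]
    rw [show (a :: b :: t) = (c :: c :: t) by simp [h.1, h.2]]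
    rw [dd_cons_repCC c t c]
    simp [dd]
  | case4 a b t h ih =>
    simp only [repCC, if_neg h]
    rw [dd_cons_repCC c (b :: t) a]

theorem hasAA_cons_repCC (c a : Char) :
    ∀ t : List Char, ∀ x : Char, hasAA a (x :: repCC c t) → hasAA a (x :: t) := by
  intro t
  induction t using repCC.induct c with
  | case1 => intro x h; simpa [repCC] using h
  | case2 b => intro x h; simpa [repCC] using h
  | case3 p q t h ih =>
    intro x hh
    simp only [repCC, if_pos h] at hh
    rw [show (p :: q :: t) = (c :: c :: t) by simp [h.1, h.2]]
    rcases hh with ⟨hx, hc⟩ | hh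
    · exact Or.inl ⟨hx, hc⟩
    · exact Or.inr (Or.inr (ih c hh))
  | case4 p q t h ih =>
    intro x hh
    simp only [repCC, if_neg h] at hh
    rcases hh with ⟨hx, hp⟩ | hh
    · exact Or.inl ⟨hx, hp⟩
    · exact Or.inr (ih p hh)

theorem hasAA_repCC (c a : Char) :
    ∀ t : List Char, hasAA a (repCC c t) → hasAA a t := by
  intro t
  induction t using repCC.induct c with
  | case1 => intro h; exact absurd h id
  | case2 b => intro h; simpa [repCC] using h
  | case3 p q t h ih =>
    intro hh
    simp only [repCC, if_pos h] at hh
    rw [show (p :: q :: t) = (c :: c :: t) by simp [h.1, h.2]]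
    exact Or.inr (hasAA_cons_repCC c a t c hh)
  | case4 p q t h ih =>
    intro hh
    simp only [repCC, if_neg h] at hh
    exact hasAA_cons_repCC c a (q :: t) p hh

theorem pyWhile_dd (c : Char) (t : List Char) : dd (pyWhile c t) = dd t := by
  induction t using pyWhile.induct c with
  | case1 t h ih =>
    rw [pyWhile, if_pos h, ih, replace_eq_repCC, dd_repCC]
  | case2 t h => rw [pyWhile, if_neg h]

theorem pyWhile_hasAA (c a : Char) (t : List Char) :
    hasAA a (pyWhile c t) → hasAA a t := by
  induction t using pyWhile.induct c with
  | case1 t h ih =>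
    intro hh
    rw [pyWhile, if_pos h] at hh
    have := ih hh
    rw [replace_eq_repCC] at this
    exact hasAA_repCC c a t this
  | case2 t h => intro hh; rwa [pyWhile, if_neg h] at hh

theorem pyWhile_no_cc (c : Char) (t : List Char) : ¬ hasAA c (pyWhile c t) := by
  induction t using pyWhile.induct c with
  | case1 t h ih => rw [pyWhile, if_pos h]; exact ih
  | case2 t h =>
    rw [pyWhile, if_neg h]
    intro hh
    rw [PySem.Chars.isIn_iff_infix] at h
    exact h ((hasAA_iff_infix c t).mp hh)

theorem fold_dd (l : List Char) :
    ∀ t0 : List Char, dd (l.foldl (fun t i => pyWhile i t) t0) = dd t0 := by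
  induction l with
  | nil => intro t0; rfl
  | cons c l ih =>
    intro t0
    simp only [List.foldl_cons]
    rw [ih (pyWhile c t0), pyWhile_dd]

theorem fold_no_aa (l : List Char) :
    ∀ t0 : List Char, (∀ a, hasAA a t0 → a ∈ l) →
      ∀ a, ¬ hasAA a (l.foldl (fun t i => pyWhile i t) t0) := by
  induction l with
  | nil => intro t0 h a hh; exact absurd (h a hh) (by simp)
  | cons c l ih =>
    intro t0 h a
    simp only [List.foldl_cons]
    apply ih (pyWhile c t0)
    intro b hb
    have hb0 : b ∈ c :: l := h b (pyWhile_hasAA c b t0 hb)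
    rcases List.mem_cons.mp hb0 with hbc | hbl
    · exact absurd hb (hbc ▸ pyWhile_no_cc c t0)
    · exact hbl

theorem dd_eq_self (l : List Char) (h : ∀ a, ¬ hasAA a l) : dd l = l := by
  induction l with
  | nil => rfl
  | cons x t ih =>
    match t, h, ih with
    | [], _, _ => rfl
    | y :: u, h, ih =>
      have hxy : x ≠ y := by
        intro he
        exact h x (Or.inl ⟨rfl, he.symm⟩)
      simp only [dd, if_neg hxy]
      rw [ih (fun a ha => h a (Or.inr ha))]

theorem dd_head (u : List Char) : ∀ y : Char, ∃ t, dd (y :: u) = y :: t := by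
  induction u with
  | nil => intro y; exact ⟨[], rfl⟩
  | cons z v ih =>
    intro y
    by_cases h : y = z
    · obtain ⟨t, ht⟩ := ih z
      exact ⟨t, by simp [dd, h, ht]⟩
    · exact ⟨dd (z :: v), by simp [dd, h]⟩

theorem bfold_some (l : List Char) :
    ∀ (x : Char) (acc : List Char),
      (l.foldl (fun (st : List Char × Option Char) ch =>
        if some ch ≠ st.2 then (st.1 ++ [ch], some ch) else st) (acc, some x)).1
      = acc ++ (dd (x :: l)).tail := by
  induction l with
  | nil => intro x acc; simp [dd]
  | cons y u ih =>
    intro x acc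
    by_cases h : y = x
    · simp only [List.foldl_cons, ne_eq, h, not_true_eq_false, if_neg,
        not_false_eq_true]
      rw [ih x acc]
      simp [dd]
    · have hne : (some y ≠ some x) := by simpa using h
      simp only [List.foldl_cons, ne_eq, hne, not_false_eq_true, reduceIte]
      rw [ih y (acc ++ [y])]
      have hx : dd (x :: y :: u) = x :: dd (y :: u) := by
        simp [dd, show x ≠ y from fun he => h he.symm]
      obtain ⟨t, ht⟩ := dd_head u y
      rw [hx, ht]
      simp

theorem bfold_eq_dd (l : List Char) :
    (l.foldl (fun (st : List Char × Option Char) ch =>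
      if some ch ≠ st.2 then (st.1 ++ [ch], some ch) else st) ([], none)).1 = dd l := by
  match l with
  | [] => rfl
  | y :: u =>
    have h0 : ((y :: u).foldl (fun (st : List Char × Option Char) ch =>
        if some ch ≠ st.2 then (st.1 ++ [ch], some ch) else st) ([], none))
        = (u.foldl (fun (st : List Char × Option Char) ch =>
        if some ch ≠ st.2 then (st.1 ++ [ch], some ch) else st) ([y], some y)) := by
      rw [List.foldl_cons]; rfl
    rw [h0, bfold_some u y [y]]
    obtain ⟨t, ht⟩ := dd_head u y
    rw [ht]
    simp

theorem final_eq_dd (s : List Char) :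
    s.foldl (fun t i => pyWhile i t) s = dd s := by
  have h1 : ∀ a, ¬ hasAA a (s.foldl (fun t i => pyWhile i t) s) :=
    fold_no_aa s s (fun a ha => hasAA_mem a s ha)
  have h2 := fold_dd s s
  rw [dd_eq_self _ h1] at h2
  exact h2

-- ===== VERDICT (by name: the statement is the Claim_ definition above) =====
theorem group_word_spec : Claim_equal_group_word := by
  intro input_value _
  unfold Spec_group_word group_word group_word_alt
  simp only [final_eq_dd, bfold_eq_dd]
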